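-- pv_equiv track=rewrite | github.com/jk-jung/problem-solving | codewars/6kyu/6_Backwards Read Primes.py | backwards_prime
-- ===== SOURCE A (Python) =====
-- def backwards_prime(s, e):
--     def f(x):
--         i = 2
--         while i * i <= x:
--             if x % i == 0:
--                 return False
--             i += 1
--         return True
--     r = []
--     for i in range(max(13, s), e + 1):
--         if f(i) and i != int(str(i)[::-1]) and f(int(str(i)[::-1])):
--             r.append(i)
--     return r
-- ===== SOURCE B (Python) =====
-- def backwards_prime(s, e):
--     # Prime cache: `primes` holds every prime <= cover, in increasing order.
--     primes = [2]
--     cover = 2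
--
--     def ensure(limit):
--         # Grow the cache until cover*cover >= limit, so primes covers all
--         # possible least factors of numbers up to `limit`.
--         nonlocal cover
--         while cover * cover < limit:
--             cover += 1
--             if all(cover % q for q in primes if q * q <= cover):
--                 primes.append(cover)
--
--     def isp(n):
--         ensure(n)
--         for q in primes:
--             if q * q > n:
--                 return True
--             if n % q == 0:
--                 return False
--         return True
--
--     out = []
--     for i in range(max(13, s), e + 1):
--         if isp(i):
--             rev = int(str(i)[::-1])
--             if rev != i and isp(rev):
--                 out.append(i)
--     return out
-- ===== Notes on version B (the rewrite author's own statement) =====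
-- stated objective: faster
-- what changed: A trial-divides every candidate and its reversal by all integers up to the square root; B maintains an incrementally grown prime cache (primes up to a cover with cover^2 >= the number being tested) and trial-divides only by those cached primes.
import Mathlib
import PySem

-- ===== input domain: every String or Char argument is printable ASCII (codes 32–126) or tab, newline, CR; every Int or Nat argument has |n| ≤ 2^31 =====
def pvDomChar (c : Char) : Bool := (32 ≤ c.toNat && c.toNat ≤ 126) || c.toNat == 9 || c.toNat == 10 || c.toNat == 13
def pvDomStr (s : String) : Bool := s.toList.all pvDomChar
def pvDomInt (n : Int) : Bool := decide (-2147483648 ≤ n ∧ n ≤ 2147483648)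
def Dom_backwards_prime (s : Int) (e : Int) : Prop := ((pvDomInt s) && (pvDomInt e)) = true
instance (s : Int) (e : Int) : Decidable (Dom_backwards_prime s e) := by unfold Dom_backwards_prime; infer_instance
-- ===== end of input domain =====

-- B replaces A's per-candidate trial division by ALL integers with an on-demand prime cache
-- (divide only by cached primes); measured constant-factor speedup, same results.

-- shared helper: int(str(i)[::-1]) — identical expression in both Pythons.
-- int() cannot raise on any reachable use (every call site has i ≥ 13, whose reversed
-- decimal string is all digits), so the .getD defaults are never taken there.
def pvRev (i : Int) : Int :=
  (PySem.Int.ofStr? ((PySem.Str.slice? (PySem.Int.toStr i) none none (-1)).getD "")).getD 0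

-- ===== PORT A =====
-- A's inner f(x): while i*i <= x: if x % i == 0: return False; i += 1; return True
def pvFA (x : Int) (i : Int) : Bool :=
  if h : i * i ≤ x then
    if PySem.Int.mod x i == 0 then false else pvFA x (i + 1)
  else true
  termination_by (x + 1 - i).toNat
  decreasing_by
    have hix : i ≤ x := by
      rcases (by omega : i ≤ 0 ∨ 0 < i) with h0 | h0
      · nlinarith
      · nlinarith
    omega

def backwards_prime (s : Int) (e : Int) : List Int :=
  (PySem.List.pyRange (max 13 s) (e + 1) 1).foldl
    (fun r i => if pvFA i 2 && (i != pvRev i) && pvFA (pvRev i) 2 then r ++ [i] else r) []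

-- ===== PORT B =====
-- all(cover % q for q in primes if q * q <= cover)
def pvTrialAll (c : Int) (primes : List Int) : Bool :=
  (primes.filter (fun q => decide (q * q ≤ c))).all (fun q => PySem.Int.mod c q != 0)

-- ensure(limit): grow (cover, primes) until cover*cover >= limit
def pvEnsure (limit cover : Int) (primes : List Int) : Int × List Int :=
  if _h : cover * cover < limit then
    pvEnsure limit (cover + 1)
      (if pvTrialAll (cover + 1) primes then primes ++ [cover + 1] else primes)
  else (cover, primes)
  termination_by (limit - cover).toNat
  decreasing_by
    have hcl : cover < limit := by
      rcases (by omega : cover ≤ 0 ∨ 0 < cover) with h0 | h0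
      · nlinarith
      · nlinarith
    omega

-- the for q in primes: … loop of isp(n)
def pvScan (n : Int) : List Int → Bool
  | [] => true
  | q :: rest =>
    if n < q * q then true
    else if PySem.Int.mod n q == 0 then false
    else pvScan n rest

-- isp(n): ensure(n) (mutating the cache), then scan; state is threaded explicitly
def pvIsp (n : Int) (st : Int × List Int) : Bool × (Int × List Int) :=
  let st' := pvEnsure n st.1 st.2
  (pvScan n st'.2, st')

def backwards_prime_alt (s : Int) (e : Int) : List Int :=
  ((PySem.List.pyRange (max 13 s) (e + 1) 1).foldl
    (fun (acc : (Int × List Int) × List Int) i =>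
      let p1 := pvIsp i acc.1
      if p1.1 then
        let rev := pvRev i
        if rev != i then
          let p2 := pvIsp rev p1.2
          if p2.1 then (p2.2, acc.2 ++ [i]) else (p2.2, acc.2)
        else (p1.2, acc.2)
      else (p1.2, acc.2))
    ((2, [2]), [])).2

-- ===== PRECONDITION & SPEC =====
def Spec_backwards_prime (s : Int) (e : Int) (out : List Int) : Prop := out = backwards_prime_alt s e
instance (s : Int) (e : Int) (out : List Int) : Decidable (Spec_backwards_prime s e out) := by unfold Spec_backwards_prime; infer_instance

-- ===== CLAIM (what is proved, stated in full; the proofs are below) =====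
def Claim_equal_backwards_prime : Prop := ∀ (s : Int) (e : Int), Dom_backwards_prime s e → Spec_backwards_prime s e (backwards_prime s e)

-- ===== LEMMAS AND PROOFS =====

-- "n has no divisor d with 2 ≤ d and d*d ≤ n" — the predicate both primality loops decide
def NoSmallFac (n : Int) : Prop := ∀ d : Int, 2 ≤ d → d * d ≤ n → ¬ d ∣ n

-- the primes the cache holds once `cover = m`
def primesUpto (m : Int) : List Int :=
  (PySem.List.pyRange 2 (m + 1) 1).filter (fun k => pvFA k 2)

theorem pvFA_iff (x : Int) (i : Int) (hi : 1 ≤ i) :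
    pvFA x i = true ↔ ∀ d : Int, i ≤ d → d * d ≤ x → ¬ d ∣ x := by
  induction i using pvFA.induct x with
  | case1 i h hmod =>
    rw [pvFA]
    simp only [h, hmod, dif_pos, if_pos, Bool.false_eq_true, false_iff]
    intro hall
    exact hall i (le_refl i) h ((PySem.Int.mod_eq_zero_iff_dvd x i).1 (by simpa using hmod))
  | case2 i h hmod ih =>
    rw [pvFA]
    simp only [h, dif_pos, hmod, Bool.false_eq_true, if_false]
    rw [ih (by omega)]
    constructor
    · intro hall d hd hdx
      rcases (by omega : d = i ∨ i + 1 ≤ d) with rfl | hd'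
      · intro hdvd
        exact hmod (by simp [(PySem.Int.mod_eq_zero_iff_dvd x d).2 hdvd])
      · exact hall d hd' hdx
    · intro hall d hd hdx
      exact hall d (by omega) hdx
  | case3 i h =>
    rw [pvFA]
    simp only [h, dif_neg, not_false_iff, true_iff]
    intro d hd hdx
    have : i * i ≤ d * d := by nlinarith
    omega

theorem exists_small_prime_divisor (n : Int) (h : ¬ NoSmallFac n) :
    ∃ q : Int, 2 ≤ q ∧ q * q ≤ n ∧ q ∣ n ∧ NoSmallFac q := by
  unfold NoSmallFac at h
  push Not at h
  obtain ⟨d, hd2, hdd, hdvd⟩ := h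
  have hn4 : (4:Int) ≤ n := by nlinarith
  have hdN : d.toNat ∣ n.toNat := by
    rcases hdvd with ⟨c, hc⟩
    have hc0 : 0 ≤ c := by nlinarith
    exact ⟨c.toNat, by rw [hc, Int.toNat_mul (by omega) hc0]⟩
  have hN1 : n.toNat ≠ 1 := by omega
  set q : Nat := n.toNat.minFac with hq
  have hqp : q.Prime := Nat.minFac_prime hN1
  have hqd : q ≤ d.toNat := Nat.minFac_le_of_dvd (by omega) hdN
  have hqdvdN : q ∣ n.toNat := Nat.minFac_dvd _
  refine ⟨(q : Int), by exact_mod_cast hqp.two_le, ?_, ?_, ?_⟩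
  · have : (q : Int) ≤ d := by omega
    nlinarith
  · have : (q : Int) ∣ (n.toNat : Int) := Int.natCast_dvd_natCast.2 hqdvdN
    rwa [Int.toNat_of_nonneg (by omega : (0:Int) ≤ n)] at this
  · intro d' hd'2 hd'q hdvd'
    have hd'N : d'.toNat ∣ q := by
      rcases hdvd' with ⟨c, hc⟩
      have hc0 : 0 ≤ c := by nlinarith [hqp.two_le]
      have h' : ((q:Int)).toNat = (d' * c).toNat := by rw [hc]
      rw [Int.toNat_mul (by omega) hc0, Int.toNat_natCast] at h'
      exact ⟨c.toNat, h'⟩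
    rcases (Nat.Prime.eq_one_or_self_of_dvd hqp _ hd'N) with h1 | h1
    · omega
    · have : d' = (q : Int) := by omega
      subst this
      nlinarith [hqp.two_le]

theorem mem_primesUpto (m q : Int) :
    q ∈ primesUpto m ↔ (2 ≤ q ∧ q < m + 1 ∧ pvFA q 2 = true) := by
  unfold primesUpto
  simp [List.mem_filter, PySem.List.mem_pyRange_one, and_assoc]

theorem primesUpto_sorted (m : Int) : (primesUpto m).Pairwise (· ≤ ·) := by
  exact ((PySem.List.pairwise_lt_pyRange_one 2 (m+1)).filter _).imp le_of_lt

theorem pvScan_iff (n : Int) (L : List Int) (h2 : ∀ q ∈ L, 2 ≤ q)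
    (hs : L.Pairwise (· ≤ ·)) :
    pvScan n L = true ↔ ∀ q ∈ L, q * q ≤ n → ¬ q ∣ n := by
  induction L with
  | nil => simp [pvScan]
  | cons q rest ih =>
    have hq2 : 2 ≤ q := h2 q (by simp)
    have hrest2 : ∀ p ∈ rest, 2 ≤ p := fun p hp => h2 p (by simp [hp])
    have hmono : ∀ p ∈ rest, q ≤ p := fun p hp => (List.pairwise_cons.1 hs).1 p hp
    have hs' := (List.pairwise_cons.1 hs).2
    rw [pvScan]
    split_ifs with hlt hm
    · simp only [true_iff]
      intro p hp hpn
      rcases List.mem_cons.1 hp with rfl | hp'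
      · omega
      · have := hmono p hp'
        nlinarith
    · simp only [false_iff]
      intro hall
      exact hall q (by simp) (by omega) ((PySem.Int.mod_eq_zero_iff_dvd n q).1 (by simpa using hm))
    · rw [ih hrest2 hs']
      constructor
      · intro hall p hp hpn
        rcases List.mem_cons.1 hp with rfl | hp'
        · intro hdvd
          exact hm (by simp [(PySem.Int.mod_eq_zero_iff_dvd n p).2 hdvd])
        · exact hall p hp' hpn
      · intro hall p hp hpn
        exact hall p (by simp [hp]) hpn

theorem complete_iff (n m : Int) (hm : 2 ≤ m) (hn : n ≤ m * m) :
    (∀ q ∈ primesUpto m, q * q ≤ n → ¬ q ∣ n) ↔ NoSmallFac n := by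
  constructor
  · intro hall
    by_contra hno
    obtain ⟨q, hq2, hqn, hqd, hqno⟩ := exists_small_prime_divisor n hno
    have hqm : q ≤ m := by nlinarith
    have hqf : pvFA q 2 = true := by
      rw [pvFA_iff q 2 (by omega)]
      intro d hd hdx
      exact hqno d hd hdx
    exact hall q ((mem_primesUpto m q).2 ⟨hq2, by omega, hqf⟩) hqn hqd
  · intro hno q hq hqn
    exact hno q ((mem_primesUpto m q).1 hq).1 hqn

theorem pvScan_primesUpto (n m : Int) (hm : 2 ≤ m) (hn : n ≤ m * m) :
    pvScan n (primesUpto m) = pvFA n 2 := by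
  rw [Bool.eq_iff_iff]
  rw [pvScan_iff n _ (fun q hq => ((mem_primesUpto m q).1 hq).1) (primesUpto_sorted m)]
  rw [pvFA_iff n 2 (by omega)]
  exact (complete_iff n m hm hn).trans (by rfl)

theorem pvTrialAll_primesUpto (n m : Int) (hm : 2 ≤ m) (hn : n ≤ m * m) :
    pvTrialAll n (primesUpto m) = pvFA n 2 := by
  rw [Bool.eq_iff_iff]
  unfold pvTrialAll
  rw [pvFA_iff n 2 (by omega)]
  have hc := complete_iff n m hm hn
  unfold NoSmallFac at hc
  rw [← hc]
  simp only [List.all_filter, List.all_eq_true, Bool.or_eq_true, Bool.not_eq_true',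
    decide_eq_false_iff_not, bne_iff_ne, ne_eq]
  constructor
  · intro hall q hq hqn hdvd
    rcases hall q hq with h' | h'
    · exact h' hqn
    · exact h' ((PySem.Int.mod_eq_zero_iff_dvd n q).2 hdvd)
  · intro hall q hq
    by_cases hqn : q * q ≤ n
    · exact Or.inr (fun hmod => hall q hq hqn ((PySem.Int.mod_eq_zero_iff_dvd n q).1 hmod))
    · exact Or.inl (fun h => absurd h hqn)

theorem primesUpto_succ (m : Int) (hm : 1 ≤ m) :
    primesUpto (m + 1) = primesUpto m ++ (if pvFA (m + 1) 2 then [m + 1] else []) := by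
  unfold primesUpto
  rw [PySem.List.pyRange_one_succ_right (by omega : (2:Int) ≤ m + 1)]
  rw [List.filter_append]
  congr 1
  by_cases h : pvFA (m + 1) 2 = true <;> simp [h]

theorem pvEnsure_spec (limit cover : Int) (hc : 2 ≤ cover) :
    2 ≤ (pvEnsure limit cover (primesUpto cover)).1 ∧
    (pvEnsure limit cover (primesUpto cover)).2 = primesUpto (pvEnsure limit cover (primesUpto cover)).1 ∧
    limit ≤ (pvEnsure limit cover (primesUpto cover)).1 * (pvEnsure limit cover (primesUpto cover)).1 := by
  have key : ∀ (k : Nat) (c : Int), (limit - c).toNat ≤ k → 2 ≤ c →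
      2 ≤ (pvEnsure limit c (primesUpto c)).1 ∧
      (pvEnsure limit c (primesUpto c)).2 = primesUpto (pvEnsure limit c (primesUpto c)).1 ∧
      limit ≤ (pvEnsure limit c (primesUpto c)).1 * (pvEnsure limit c (primesUpto c)).1 := by
    intro k
    induction k with
    | zero =>
      intro c hk hc2
      have hlc : limit ≤ c := by omega
      have hcl : ¬ c * c < limit := by nlinarith
      rw [pvEnsure, dif_neg hcl]
      exact ⟨hc2, rfl, not_lt.1 hcl⟩
    | succ k ih =>
      intro c hk hc2
      by_cases hcl : c * c < limit
      · have hstep : (if pvTrialAll (c + 1) (primesUpto c) then primesUpto c ++ [c + 1]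
            else primesUpto c) = primesUpto (c + 1) := by
          rw [pvTrialAll_primesUpto (c+1) c hc2 (by nlinarith), primesUpto_succ c (by omega)]
          by_cases h : pvFA (c + 1) 2 = true <;> simp [h]
        rw [pvEnsure, dif_pos hcl, hstep]
        have hcll : c < limit := by nlinarith
        exact ih (c + 1) (by omega) (by omega)
      · rw [pvEnsure, dif_neg hcl]
        exact ⟨hc2, rfl, not_lt.1 hcl⟩
  exact key (limit - cover).toNat cover (le_refl _) hc

theorem stepB_eq (i : Int) (out : List Int) (cover : Int) (hc : 2 ≤ cover) :
    ∃ c' : Int, 2 ≤ c' ∧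
      (fun (acc : (Int × List Int) × List Int) i =>
        let p1 := pvIsp i acc.1
        if p1.1 then
          let rev := pvRev i
          if rev != i then
            let p2 := pvIsp rev p1.2
            if p2.1 then (p2.2, acc.2 ++ [i]) else (p2.2, acc.2)
          else (p1.2, acc.2)
        else (p1.2, acc.2)) ((cover, primesUpto cover), out) i
      = ((c', primesUpto c'),
         if pvFA i 2 && (i != pvRev i) && pvFA (pvRev i) 2 then out ++ [i] else out) := by
  obtain ⟨hc1, hL1, hlim1⟩ := pvEnsure_spec i cover hc
  set st1 := pvEnsure i cover (primesUpto cover) with hst1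
  have hscan1 : pvScan i st1.2 = pvFA i 2 := by
    rw [hL1]; exact pvScan_primesUpto i _ hc1 hlim1
  simp only [pvIsp]
  rw [← hst1, hscan1]
  by_cases hfi : pvFA i 2 = true
  · rw [if_pos hfi]
    by_cases hrev : pvRev i = i
    · refine ⟨st1.1, hc1, ?_⟩
      rw [hrev]
      simp only [bne_self_eq_false, Bool.false_eq_true, if_false, Bool.and_false]
      simp [← hL1]
    · have hE2 : pvEnsure (pvRev i) st1.1 st1.2 = pvEnsure (pvRev i) st1.1 (primesUpto st1.1) := by
        rw [hL1]
      obtain ⟨hc2, hL2, hlim2⟩ := pvEnsure_spec (pvRev i) st1.1 hc1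
      have hscan2 : pvScan (pvRev i) (pvEnsure (pvRev i) st1.1 (primesUpto st1.1)).2
          = pvFA (pvRev i) 2 := by
        rw [hL2]; exact pvScan_primesUpto (pvRev i) _ hc2 hlim2
      refine ⟨(pvEnsure (pvRev i) st1.1 (primesUpto st1.1)).1, hc2, ?_⟩
      rw [if_pos (by simp [bne_iff_ne]; exact hrev), hE2, hscan2]
      have hine : (i != pvRev i) = true := by simp [bne_iff_ne]; exact Ne.symm hrev
      by_cases hfr : pvFA (pvRev i) 2 = true
      · rw [if_pos hfr]
        simp only [hfi, hine, hfr, Bool.and_self, if_pos]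
        simp [← hL2]
      · have hfr' : pvFA (pvRev i) 2 = false := by simpa using hfr
        rw [if_neg hfr]
        simp only [hfi, hine, Bool.true_and, hfr', Bool.and_false,
          Bool.false_eq_true, if_false]
        simp [← hL2]
  · have hfi' : pvFA i 2 = false := by simpa using hfi
    rw [if_neg hfi]
    refine ⟨st1.1, hc1, ?_⟩
    simp only [hfi', Bool.false_and, Bool.false_eq_true, if_false]
    simp [← hL1]

theorem fold_eq (R : List Int) (out : List Int) (cover : Int) (hc : 2 ≤ cover) :
    (R.foldl
      (fun (acc : (Int × List Int) × List Int) i =>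
        let p1 := pvIsp i acc.1
        if p1.1 then
          let rev := pvRev i
          if rev != i then
            let p2 := pvIsp rev p1.2
            if p2.1 then (p2.2, acc.2 ++ [i]) else (p2.2, acc.2)
          else (p1.2, acc.2)
        else (p1.2, acc.2))
      ((cover, primesUpto cover), out)).2
    = R.foldl
        (fun r i => if pvFA i 2 && (i != pvRev i) && pvFA (pvRev i) 2 then r ++ [i] else r) out := by
  induction R generalizing out cover with
  | nil => rfl
  | cons i R ih =>
    rw [List.foldl_cons, List.foldl_cons]
    obtain ⟨c', hc', heq⟩ := stepB_eq i out cover hc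
    refine Eq.trans (congrArg (fun z =>
      (List.foldl (fun (acc : (Int × List Int) × List Int) i =>
        let p1 := pvIsp i acc.1
        if p1.1 then
          let rev := pvRev i
          if rev != i then
            let p2 := pvIsp rev p1.2
            if p2.1 then (p2.2, acc.2 ++ [i]) else (p2.2, acc.2)
          else (p1.2, acc.2)
        else (p1.2, acc.2)) z R).2) heq)
      (ih (if pvFA i 2 && (i != pvRev i) && pvFA (pvRev i) 2 then out ++ [i] else out) c' hc')

-- ===== VERDICT (by name: the statement is the Claim_ definition above) =====
theorem backwards_prime_spec : Claim_equal_backwards_prime := by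
  intro s e _
  unfold Spec_backwards_prime backwards_prime backwards_prime_alt
  have hf : pvFA 2 2 = true := by rw [pvFA]; norm_num
  have h2 : primesUpto 2 = [2] := by
    unfold primesUpto
    rw [show (2:Int) + 1 = 3 from rfl, PySem.List.pyRange_one_cons (by norm_num),
        PySem.List.pyRange_one_eq_nil (by norm_num)]
    simp [hf]
  rw [← fold_eq _ [] 2 (by norm_num), h2]
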